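-- pv_equiv track=rewrite | github.com/WonHwang/1D1P_2 | P133499.py | solution
-- ===== SOURCE A (Python) =====
-- word2 = ["ye", "ma"]
--
-- word3 = ["aya", "woo"]
--
-- def solution(babbling):
--
--     answer = 0
--
--     for word in babbling:
--         past = ""
--         result = 1
--
--         while word:
--             if len(word) < 2:
--                 result = 0
--                 break
--
--             if word[:2] in word2:
--                 if word[:2] == past:
--                     result = 0
--                     break
--                 past = word[:2]
--                 word = word[2:]
--                 continue
--
--             if len(word) < 3:
--                 result = 0
--                 break
--
--             if word[:3] in word3:
--                 if word[:3] == past: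
--                     result = 0
--                     break
--                 past = word[:3]
--                 word = word[3:]
--                 continue
--
--             result = 0
--             break
--
--         if result:
--             answer += 1
--
--     return answer
-- ===== SOURCE B (Python) =====
-- def solution(babbling):
--     answer = 0
--     for word in babbling:
--         # pass 1: tokenize the whole word, skipping unmatched characters
--         tokens = []
--         i = 0
--         n = len(word)
--         while i < n:
--             if word.startswith("aya", i):
--                 tokens.append("aya"); i += 3
--             elif word.startswith("woo", i):
--                 tokens.append("woo"); i += 3
--             elif word.startswith("ye", i):
--                 tokens.append("ye"); i += 2
--             elif word.startswith("ma", i):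
--                 tokens.append("ma"); i += 2
--             else:
--                 i += 1
--         # pass 2: validate — full contiguous coverage and no adjacent repeats
--         if "".join(tokens) == word and all(tokens[j] != tokens[j - 1] for j in range(1, len(tokens))):
--             answer += 1
--     return answer
-- ===== Notes on version B (the rewrite author's own statement) =====
-- stated objective: alternative
-- what changed: A's interleaved greedy scan with inline repeat-check and early break is replaced by a two-pass decomposition: tokenize the whole word first (skipping unmatched characters), then validate by join-equality and an adjacent-pairs check.
import Mathlib
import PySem

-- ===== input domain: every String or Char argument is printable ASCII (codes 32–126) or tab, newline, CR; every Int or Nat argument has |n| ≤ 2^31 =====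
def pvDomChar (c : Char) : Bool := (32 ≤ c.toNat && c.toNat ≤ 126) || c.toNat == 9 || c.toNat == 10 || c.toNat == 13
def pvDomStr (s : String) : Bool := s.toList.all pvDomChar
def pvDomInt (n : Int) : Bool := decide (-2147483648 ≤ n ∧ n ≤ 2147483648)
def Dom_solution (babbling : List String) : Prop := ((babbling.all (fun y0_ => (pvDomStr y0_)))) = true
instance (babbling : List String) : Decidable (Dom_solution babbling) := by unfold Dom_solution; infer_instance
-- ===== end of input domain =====

-- B replaces A's interleaved greedy scan + inline repeat-check by a tokenize-then-validate
-- two-pass decomposition (alternative decomposition, same cost).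

-- ===== PORT A =====
-- A's inner while loop: `past` and the remaining `word` are the loop state; returns `result`.
def checkA (past word : List Char) : Int :=
  if word = [] then 1
  else if word.length < 2 then 0
  else if word.take 2 = ['y','e'] ∨ word.take 2 = ['m','a'] then
    (if word.take 2 = past then 0 else checkA (word.take 2) (word.drop 2))
  else if word.length < 3 then 0
  else if word.take 3 = ['a','y','a'] ∨ word.take 3 = ['w','o','o'] then
    (if word.take 3 = past then 0 else checkA (word.take 3) (word.drop 3))
  else 0
termination_by word.length
decreasing_by all_goals (simp; omega)

def solution (babbling : List String) : Int :=
  babbling.foldl (fun answer word => if checkA [] word.toList ≠ 0 then answer + 1 else answer) 0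

-- ===== PORT B =====
-- pass 1 of Source B: the startswith-chain tokenizer (startswith at index i ≡ take on the suffix)
def toksB (w : List Char) : List (List Char) :=
  if w = [] then []
  else if w.take 3 = ['a','y','a'] then ['a','y','a'] :: toksB (w.drop 3)
  else if w.take 3 = ['w','o','o'] then ['w','o','o'] :: toksB (w.drop 3)
  else if w.take 2 = ['y','e'] then ['y','e'] :: toksB (w.drop 2)
  else if w.take 2 = ['m','a'] then ['m','a'] :: toksB (w.drop 2)
  else toksB (w.drop 1)
termination_by w.length
decreasing_by all_goals (have h := List.length_pos_of_ne_nil (by assumption); simp; omega)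

-- pass 2 of Source B: the adjacent-pairs comprehension `all(tokens[j] != tokens[j-1] ...)`
def adjB (ts : List (List Char)) : Bool :=
  (ts.zip ts.tail).all (fun p => decide (p.1 ≠ p.2))

def okB (word : List Char) : Bool :=
  let ts := toksB word
  decide (ts.flatten = word) && adjB ts

def solution_alt (babbling : List String) : Int :=
  babbling.foldl (fun answer word => if okB word.toList then answer + 1 else answer) 0

-- ===== PRECONDITION & SPEC =====
def Spec_solution (babbling : List String) (out : Int) : Prop := out = solution_alt babbling
instance (babbling : List String) (out : Int) : Decidable (Spec_solution babbling out) := by unfold Spec_solution; infer_instance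

-- ===== CLAIM (what is proved, stated in full; the proofs are below) =====
def Claim_equal_solution : Prop := ∀ (babbling : List String), Dom_solution babbling → Spec_solution babbling (solution babbling)

-- ===== LEMMAS AND PROOFS =====

lemma toksB_flatten_len (w : List Char) : (toksB w).flatten.length ≤ w.length := by
  generalize hn : w.length = n
  induction n using Nat.strong_induction_on generalizing w with
  | _ n ih =>
    subst hn
    rw [toksB]
    split_ifs with h0 h1 h2 h3 h4
    · subst h0; simp
    all_goals have hpos := List.length_pos_of_ne_nil h0
    · have hl := congrArg List.length h1
      simp only [List.length_take, List.length_cons, List.length_nil] at hl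
      have := ih (w.drop 3).length (by simp; omega) (w.drop 3) rfl
      simp only [List.flatten_cons, List.length_append, List.length_cons, List.length_nil,
        List.length_drop] at this ⊢
      omega
    · have hl := congrArg List.length h2
      simp only [List.length_take, List.length_cons, List.length_nil] at hl
      have := ih (w.drop 3).length (by simp; omega) (w.drop 3) rfl
      simp only [List.flatten_cons, List.length_append, List.length_cons, List.length_nil,
        List.length_drop] at this ⊢
      omega
    · have hl := congrArg List.length h3
      simp only [List.length_take, List.length_cons, List.length_nil] at hl
      have := ih (w.drop 2).length (by simp; omega) (w.drop 2) rfl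
      simp only [List.flatten_cons, List.length_append, List.length_cons, List.length_nil,
        List.length_drop] at this ⊢
      omega
    · have hl := congrArg List.length h4
      simp only [List.length_take, List.length_cons, List.length_nil] at hl
      have := ih (w.drop 2).length (by simp; omega) (w.drop 2) rfl
      simp only [List.flatten_cons, List.length_append, List.length_cons, List.length_nil,
        List.length_drop] at this ⊢
      omega
    · have := ih (w.drop 1).length (by simp; omega) (w.drop 1) rfl
      simp only [List.length_drop] at this
      omega

lemma toksB_ne_nil (w : List Char) : ∀ t ∈ toksB w, t ≠ [] := by
  generalize hn : w.length = n
  induction n using Nat.strong_induction_on generalizing w with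
  | _ n ih =>
    subst hn
    rw [toksB]
    split_ifs with h0 h1 h2 h3 h4 <;> intro t ht
    · simp at ht
    all_goals have hpos := List.length_pos_of_ne_nil h0
    · rcases List.mem_cons.1 ht with rfl | ht; · simp
      exact ih (w.drop 3).length (by simp; omega) (w.drop 3) rfl t ht
    · rcases List.mem_cons.1 ht with rfl | ht; · simp
      exact ih (w.drop 3).length (by simp; omega) (w.drop 3) rfl t ht
    · rcases List.mem_cons.1 ht with rfl | ht; · simp
      exact ih (w.drop 2).length (by simp; omega) (w.drop 2) rfl t ht
    · rcases List.mem_cons.1 ht with rfl | ht; · simp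
      exact ih (w.drop 2).length (by simp; omega) (w.drop 2) rfl t ht
    · exact ih (w.drop 1).length (by simp; omega) (w.drop 1) rfl t ht

lemma adjB_cons (p t : List Char) (ts : List (List Char)) :
    adjB (p :: t :: ts) = (decide (p ≠ t) && adjB (t :: ts)) := by
  simp [adjB]

-- core invariant: A's loop succeeds iff B's tokens cover the word and the chain p :: tokens has no adjacent repeat
lemma checkA_eq (p w : List Char) :
    checkA p w = if ((toksB w).flatten = w ∧ adjB (p :: toksB w) = true) then 1 else 0 := by
  generalize hn : w.length = n
  induction n using Nat.strong_induction_on generalizing p w with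
  | _ n ih =>
  subst hn
  match w with
  | [] => rw [checkA]; simp [toksB, adjB]
  | [c] =>
    rw [checkA]
    have htoks : toksB [c] = [] := by rw [toksB]; simp [toksB]
    rw [htoks]; simp
  | c1 :: c2 :: rest =>
    rw [checkA, if_neg (by simp), if_neg (by simp)]
    simp only [List.take_succ_cons, List.take_zero, List.drop_succ_cons, List.drop_zero]
    by_cases h2 : ([c1, c2] : List Char) = ['y','e'] ∨ ([c1, c2] : List Char) = ['m','a']
    · rw [if_pos h2]
      have htoks : toksB (c1 :: c2 :: rest) = [c1, c2] :: toksB rest := by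
        rcases h2 with h2 | h2 <;> simp at h2 <;> obtain ⟨rfl, rfl⟩ := h2 <;> (rw [toksB]; simp)
      rw [htoks]
      by_cases hp : ([c1, c2] : List Char) = p
      · subst hp
        rw [if_pos rfl, if_neg]
        rintro ⟨-, hadj⟩
        rw [adjB_cons] at hadj
        simp at hadj
      · rw [if_neg hp, ih rest.length (by simp only [List.length_cons]; omega) [c1, c2] rest rfl, adjB_cons]
        have hd : (decide (p ≠ [c1, c2])) = true := by simp only [ne_eq, decide_eq_true_eq]; exact fun h => hp h.symm
        have hcov : (([c1, c2] :: toksB rest).flatten = c1 :: c2 :: rest) ↔ ((toksB rest).flatten = rest) := by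
          simp
        simp only [hd, Bool.true_and, hcov]
    · rw [if_neg h2]
      have hY : ¬ (c1 :: c2 :: rest).take 2 = ['y','e'] := by simp only [List.take_succ_cons, List.take_zero]; exact fun h => h2 (Or.inl h)
      have hM : ¬ (c1 :: c2 :: rest).take 2 = ['m','a'] := by simp only [List.take_succ_cons, List.take_zero]; exact fun h => h2 (Or.inr h)
      by_cases hlen3 : (c1 :: c2 :: rest).length < 3
      · rw [if_pos hlen3]
        have hr : rest = [] := by simp at hlen3; exact List.eq_nil_of_length_eq_zero (by omega)
        subst hr
        have htoks : toksB [c1, c2] = [] := by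
          rw [toksB, if_neg (by simp), if_neg (by intro h; simpa using congrArg List.length h),
              if_neg (by intro h; simpa using congrArg List.length h), if_neg hY, if_neg hM]
          rw [show ([c1, c2] : List Char).drop 1 = [c2] by simp]
          rw [toksB]; simp [toksB]
        rw [htoks]; simp
      · rw [if_neg hlen3]
        obtain ⟨c3, rest', rfl⟩ : ∃ c3 r', rest = c3 :: r' := by
          cases rest with
          | nil => simp at hlen3
          | cons x y => exact ⟨x, y, rfl⟩
        simp only [List.take_succ_cons, List.take_zero, List.drop_succ_cons, List.drop_zero]
        by_cases h3 : ([c1, c2, c3] : List Char) = ['a','y','a'] ∨ ([c1, c2, c3] : List Char) = ['w','o','o']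
        · rw [if_pos h3]
          have htoks : toksB (c1 :: c2 :: c3 :: rest') = [c1, c2, c3] :: toksB rest' := by
            rcases h3 with h3 | h3 <;> simp at h3 <;> obtain ⟨rfl, rfl, rfl⟩ := h3 <;> (rw [toksB]; simp)
          rw [htoks]
          by_cases hp : ([c1, c2, c3] : List Char) = p
          · subst hp
            rw [if_pos rfl, if_neg]
            rintro ⟨-, hadj⟩
            rw [adjB_cons] at hadj
            simp at hadj
          · rw [if_neg hp, ih rest'.length (by simp only [List.length_cons]; omega) [c1, c2, c3] rest' rfl, adjB_cons]
            have hd : (decide (p ≠ [c1, c2, c3])) = true := by simp only [ne_eq, decide_eq_true_eq]; exact fun h => hp h.symm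
            have hcov : (([c1, c2, c3] :: toksB rest').flatten = c1 :: c2 :: c3 :: rest') ↔ ((toksB rest').flatten = rest') := by
              simp
            simp only [hd, Bool.true_and, hcov]
        · rw [if_neg h3]
          have hA : ¬ (c1 :: c2 :: c3 :: rest').take 3 = ['a','y','a'] := by
            simp only [List.take_succ_cons, List.take_zero]; exact fun h => h3 (Or.inl h)
          have hW : ¬ (c1 :: c2 :: c3 :: rest').take 3 = ['w','o','o'] := by
            simp only [List.take_succ_cons, List.take_zero]; exact fun h => h3 (Or.inr h)
          have htoks : toksB (c1 :: c2 :: c3 :: rest') = toksB (c2 :: c3 :: rest') := by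
            rw [toksB, if_neg (by simp), if_neg hA, if_neg hW, if_neg hY, if_neg hM]
            simp
          have hlt : (toksB (c1 :: c2 :: c3 :: rest')).flatten.length < (c1 :: c2 :: c3 :: rest').length := by
            rw [htoks]
            have := toksB_flatten_len (c2 :: c3 :: rest')
            simp at this ⊢; omega
          rw [if_neg]
          rintro ⟨hc, -⟩
          rw [hc] at hlt
          omega

-- with past = "" the extra head of the chain never trips (tokens are nonempty)
lemma checkA_okB (w : List Char) : (checkA [] w ≠ 0) ↔ okB w = true := by
  rw [checkA_eq]
  unfold okB
  cases hts : toksB w with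
  | nil => simp [adjB]
  | cons t ts =>
    have hne : t ≠ [] := toksB_ne_nil w t (by rw [hts]; simp)
    rw [adjB_cons]
    have : (decide ¬([] : List Char) = t) = true := by simpa using hne
    simp only [this, Bool.true_and]
    by_cases hc : (t :: ts).flatten = w <;> simp [hc]

-- ===== VERDICT (by name: the statement is the Claim_ definition above) =====
theorem solution_spec : Claim_equal_solution := by
  intro babbling _
  show solution babbling = solution_alt babbling
  unfold solution solution_alt
  congr 1
  funext answer word
  by_cases h : checkA [] word.toList ≠ 0
  · rw [if_pos h, if_pos ((checkA_okB word.toList).1 h)]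
  · rw [if_neg h]
    rw [if_neg]
    intro hb
    exact h ((checkA_okB word.toList).2 hb)
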